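-- pv_equiv track=rewrite | github.com/weitingzhao/bifrost-stock-expert | backend-services/src/agents/news_signal_agent.py | _news_date_to_ref_date
-- ===== SOURCE A (Python) =====
-- from typing import Any, Optional
--
-- def _news_date_to_ref_date(news_date_str: str, trade_dates_desc: list[str]) -> Optional[str]:
--     """将新闻日期（YYYY-MM-DD）映射到最近的交易日（<= 该日）。"""
--     if not trade_dates_desc:
--         return None
--     try:
--         d = news_date_str[:10]
--         for td in trade_dates_desc:
--             if td <= d:
--                 return td
--         return trade_dates_desc[-1]
--     except Exception:
--         return trade_dates_desc[0] if trade_dates_desc else None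
-- ===== SOURCE B (Python) =====
-- def _news_date_to_ref_date(news_date_str, trade_dates_desc):
--     if not trade_dates_desc:
--         return None
--     d = news_date_str[:10]
--     res = trade_dates_desc[-1]
--     for td in reversed(trade_dates_desc):
--         if td <= d:
--             res = td
--     return res
-- ===== Notes on version B (the rewrite author's own statement) =====
-- stated objective: alternative
-- what changed: Replaces the forward scan with early return (and unreachable try/except plus fallback to the last element) by a single back-to-front accumulator fold seeded with the last element, where the last update wins; both are O(n) linear scans but structured oppositely.
import Mathlib
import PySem

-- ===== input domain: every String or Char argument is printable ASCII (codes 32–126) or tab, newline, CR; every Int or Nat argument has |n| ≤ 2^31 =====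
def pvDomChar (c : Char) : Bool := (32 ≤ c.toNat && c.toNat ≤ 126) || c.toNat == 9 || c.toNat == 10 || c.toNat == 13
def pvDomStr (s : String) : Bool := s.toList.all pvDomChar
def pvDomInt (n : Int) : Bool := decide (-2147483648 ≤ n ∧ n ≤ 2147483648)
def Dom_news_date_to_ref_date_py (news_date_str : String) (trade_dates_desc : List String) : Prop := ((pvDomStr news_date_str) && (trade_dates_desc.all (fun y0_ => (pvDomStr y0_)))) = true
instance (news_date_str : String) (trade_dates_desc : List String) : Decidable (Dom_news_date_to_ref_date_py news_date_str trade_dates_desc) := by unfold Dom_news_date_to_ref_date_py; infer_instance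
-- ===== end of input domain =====

-- B replaces A's forward scan with early return by a back-to-front accumulator fold
-- seeded with the last element (alternative decomposition, same O(n) cost).
-- ===== PORT A =====
-- the for-loop of A: return the first td with td <= d, else fall through (none)
def ndLoopA (d : String) : List String → Option String
  | [] => none
  | td :: rest => if td ≤ d then some td else ndLoopA d rest

def news_date_to_ref_date_py (news_date_str : String) (trade_dates_desc : List String) : Option String :=
  if trade_dates_desc.isEmpty then none
  else
    let d := PySem.Str.slice news_date_str none (some 10)
    match ndLoopA d trade_dates_desc with
    | some td => some td
    | none => PySem.List.pyGet? trade_dates_desc (-1)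

-- ===== PORT B =====
def news_date_to_ref_date_py_alt (news_date_str : String) (trade_dates_desc : List String) : Option String :=
  if trade_dates_desc.isEmpty then none
  else
    let d := PySem.Str.slice news_date_str none (some 10)
    match PySem.List.pyGet? trade_dates_desc (-1) with
    | none => none  -- unreachable: the list is nonempty
    | some r0 =>
        some (trade_dates_desc.reverse.foldl (fun res td => if td ≤ d then td else res) r0)

-- ===== PRECONDITION & SPEC =====
def Spec_news_date_to_ref_date_py (news_date_str : String) (trade_dates_desc : List String) (out : Option String) : Prop := out = news_date_to_ref_date_py_alt news_date_str trade_dates_desc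
instance (news_date_str : String) (trade_dates_desc : List String) (out : Option String) : Decidable (Spec_news_date_to_ref_date_py news_date_str trade_dates_desc out) := by unfold Spec_news_date_to_ref_date_py; infer_instance

-- ===== CLAIM (what is proved, stated in full; the proofs are below) =====
def Claim_equal_news_date_to_ref_date_py : Prop := ∀ (news_date_str : String) (trade_dates_desc : List String), Dom_news_date_to_ref_date_py news_date_str trade_dates_desc → Spec_news_date_to_ref_date_py news_date_str trade_dates_desc (news_date_to_ref_date_py news_date_str trade_dates_desc)

-- ===== LEMMAS AND PROOFS =====

-- ===== VERDICT (by name: the statement is the Claim_ definition above) =====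
-- the backward fold computes A's loop result, with r0 as the default
lemma ndFold_eq (d r0 : String) (l : List String) :
    l.reverse.foldl (fun res td => if td ≤ d then td else res) r0
      = (ndLoopA d l).getD r0 := by
  induction l with
  | nil => simp [ndLoopA]
  | cons td rest ih =>
      simp only [List.reverse_cons, List.foldl_append, List.foldl_cons, List.foldl_nil, ih,
        ndLoopA]
      by_cases h : td ≤ d <;> simp [h]

lemma pyGet_last_isSome (l : List String) (h : ¬ l.isEmpty = true) :
    ∃ r, PySem.List.pyGet? l (-1) = some r := by
  cases l with
  | nil => simp at h
  | cons x xs => simp [PySem.List.pyGet?, PySem.List.pyIdx?]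

theorem news_date_to_ref_date_py_spec : Claim_equal_news_date_to_ref_date_py := by
  intro s l _
  unfold Spec_news_date_to_ref_date_py news_date_to_ref_date_py news_date_to_ref_date_py_alt
  by_cases hl : l.isEmpty
  · simp [hl]
  · obtain ⟨r0, hr⟩ := pyGet_last_isSome l (by simpa using hl)
    simp only [hl, hr, ndFold_eq]
    cases ndLoopA (PySem.Str.slice s none (some 10)) l with
    | none => simp [hr]
    | some td => simp
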